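-- pv_equiv track=rewrite | github.com/NOMARJ/sigil | api/security/forge_access.py | get_plans_with_feature
-- ===== SOURCE A (Python) =====
-- from enum import Enum
-- from typing import Any, Dict, List, Optional
--
-- class SigilPlan(str, Enum):
--     """Available billing plan tiers."""
--
--     FREE = "free"
--     PRO = "pro"
--     TEAM = "team"
--     ENTERPRISE = "enterprise"
--
-- class ForgeFeature(str, Enum):
--     """Forge premium feature flags."""
--
--     # Tool tracking and personal productivity
--     TOOL_TRACKING = "tool_tracking"
--     PERSONAL_ANALYTICS = "personal_analytics"
--     CUSTOM_STACKS = "custom_stacks"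
--     ALERTS = "alerts"
--     EXPORTS = "exports"
--
--     # Team collaboration features
--     TEAM_ANALYTICS = "team_analytics"
--     TEAM_STACKS = "team_stacks"
--     TEAM_SHARING = "team_sharing"
--
--     # Organization-wide features
--     ORGANIZATION_ANALYTICS = "organization_analytics"
--     COMPLIANCE_REPORTING = "compliance_reporting"
--
--     # API access levels
--     API_ACCESS = "api_access"
--     WEBHOOKS = "webhooks"
--
--     # Advanced features
--     AI_RECOMMENDATIONS = "ai_recommendations"
--     CUSTOM_CATEGORIES = "custom_categories"
--     PRIORITY_SUPPORT = "priority_support"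
--
-- FEATURE_ACCESS = {
--     SigilPlan.FREE: [
--         # Free users can discover tools but can't track
--     ],
--     SigilPlan.PRO: [
--         ForgeFeature.TOOL_TRACKING,
--         ForgeFeature.PERSONAL_ANALYTICS,
--         ForgeFeature.CUSTOM_STACKS,
--         ForgeFeature.ALERTS,
--         ForgeFeature.EXPORTS,
--         ForgeFeature.API_ACCESS,
--         ForgeFeature.AI_RECOMMENDATIONS,
--     ],
--     SigilPlan.TEAM: [
--         # Includes all Pro features plus:
--         ForgeFeature.TEAM_ANALYTICS,
--         ForgeFeature.TEAM_STACKS,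
--         ForgeFeature.TEAM_SHARING,
--         ForgeFeature.WEBHOOKS,
--         ForgeFeature.CUSTOM_CATEGORIES,
--     ],
--     SigilPlan.ENTERPRISE: [
--         # Includes all Team features plus:
--         ForgeFeature.ORGANIZATION_ANALYTICS,
--         ForgeFeature.COMPLIANCE_REPORTING,
--         ForgeFeature.PRIORITY_SUPPORT,
--     ]
-- }
--
-- def get_plans_with_feature(feature: ForgeFeature) -> List[str]:
--     """Get list of plans that include a specific feature."""
--     plans = []
--     plan_hierarchy = [SigilPlan.FREE, SigilPlan.PRO, SigilPlan.TEAM, SigilPlan.ENTERPRISE]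
--     cumulative_features = []
--
--     for plan in plan_hierarchy:
--         cumulative_features.extend(FEATURE_ACCESS.get(plan, []))
--         if feature in cumulative_features:
--             plans.append(plan.value)
--
--     return plans
-- ===== SOURCE B (Python) =====
-- from enum import Enum
-- from typing import List
--
-- class SigilPlan(str, Enum):
--     FREE = "free"
--     PRO = "pro"
--     TEAM = "team"
--     ENTERPRISE = "enterprise"
--
-- class ForgeFeature(str, Enum):
--     TOOL_TRACKING = "tool_tracking"
--     PERSONAL_ANALYTICS = "personal_analytics"
--     CUSTOM_STACKS = "custom_stacks"
--     ALERTS = "alerts"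
--     EXPORTS = "exports"
--     TEAM_ANALYTICS = "team_analytics"
--     TEAM_STACKS = "team_stacks"
--     TEAM_SHARING = "team_sharing"
--     ORGANIZATION_ANALYTICS = "organization_analytics"
--     COMPLIANCE_REPORTING = "compliance_reporting"
--     API_ACCESS = "api_access"
--     WEBHOOKS = "webhooks"
--     AI_RECOMMENDATIONS = "ai_recommendations"
--     CUSTOM_CATEGORIES = "custom_categories"
--     PRIORITY_SUPPORT = "priority_support"
--
-- FEATURE_ACCESS = {
--     SigilPlan.FREE: [],
--     SigilPlan.PRO: [
--         ForgeFeature.TOOL_TRACKING,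
--         ForgeFeature.PERSONAL_ANALYTICS,
--         ForgeFeature.CUSTOM_STACKS,
--         ForgeFeature.ALERTS,
--         ForgeFeature.EXPORTS,
--         ForgeFeature.API_ACCESS,
--         ForgeFeature.AI_RECOMMENDATIONS,
--     ],
--     SigilPlan.TEAM: [
--         ForgeFeature.TEAM_ANALYTICS,
--         ForgeFeature.TEAM_STACKS,
--         ForgeFeature.TEAM_SHARING,
--         ForgeFeature.WEBHOOKS,
--         ForgeFeature.CUSTOM_CATEGORIES,
--     ],
--     SigilPlan.ENTERPRISE: [
--         ForgeFeature.ORGANIZATION_ANALYTICS,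
--         ForgeFeature.COMPLIANCE_REPORTING,
--         ForgeFeature.PRIORITY_SUPPORT,
--     ]
-- }
--
-- def get_plans_with_feature(feature: ForgeFeature) -> List[str]:
--     """Get list of plans that include a specific feature."""
--     plan_hierarchy = [SigilPlan.FREE, SigilPlan.PRO, SigilPlan.TEAM, SigilPlan.ENTERPRISE]
--     for i, plan in enumerate(plan_hierarchy):
--         if feature in FEATURE_ACCESS.get(plan, []):
--             # inclusion is cumulative: every later tier also has the feature
--             return [p.value for p in plan_hierarchy[i:]]
--     return []
-- ===== Notes on version B (the rewrite author's own statement) =====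
-- stated objective: simpler
-- what changed: B drops the cumulative-feature accumulator and the per-tier membership re-test: it scans once for the first tier whose OWN feature list introduces the feature and returns the hierarchy suffix from there, relying on the monotone inclusion of tiers.
import Mathlib
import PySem

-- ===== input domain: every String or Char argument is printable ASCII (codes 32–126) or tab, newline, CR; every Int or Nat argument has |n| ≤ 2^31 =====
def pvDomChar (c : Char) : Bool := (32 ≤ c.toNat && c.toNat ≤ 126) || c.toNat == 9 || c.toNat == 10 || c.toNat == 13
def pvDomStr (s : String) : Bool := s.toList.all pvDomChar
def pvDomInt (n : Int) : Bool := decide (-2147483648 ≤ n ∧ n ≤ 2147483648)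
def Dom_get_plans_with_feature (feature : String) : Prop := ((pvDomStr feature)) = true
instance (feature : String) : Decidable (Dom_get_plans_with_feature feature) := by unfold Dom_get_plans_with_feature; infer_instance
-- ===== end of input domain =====

-- B replaces A's cumulative-feature accumulator with a single scan for the tier that
-- introduces the feature, returning the plan-hierarchy suffix from that tier (objective: simpler).

-- shared module constants (FEATURE_ACCESS, rendered as plan ↦ own feature list)
def pvFeatureAccess : PySem.Dict String (List String) :=
  PySem.Dict.ofList [("free", []),
   ("pro", ["tool_tracking", "personal_analytics", "custom_stacks", "alerts",
            "exports", "api_access", "ai_recommendations"]),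
   ("team", ["team_analytics", "team_stacks", "team_sharing", "webhooks",
             "custom_categories"]),
   ("enterprise", ["organization_analytics", "compliance_reporting", "priority_support"])]

def pvHierarchy : List String := ["free", "pro", "team", "enterprise"]

-- ===== PORT A =====
-- loop state: (plans, cumulative_features)
def get_plans_with_feature (feature : String) : List String :=
  (pvHierarchy.foldl
    (fun (st : List String × List String) plan =>
      let cumulative := st.2 ++ PySem.Dict.getD pvFeatureAccess plan []
      (if feature ∈ cumulative then st.1 ++ [plan] else st.1, cumulative))
    ([], [])).1

-- ===== PORT B =====
-- first plan whose OWN feature list contains the feature → suffix of the hierarchy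
def pvSuffixFrom (feature : String) : List String → List String
  | [] => []
  | plan :: rest =>
    if feature ∈ PySem.Dict.getD pvFeatureAccess plan [] then plan :: rest
    else pvSuffixFrom feature rest

def get_plans_with_feature_alt (feature : String) : List String :=
  pvSuffixFrom feature pvHierarchy

-- ===== PRECONDITION & SPEC =====
def Spec_get_plans_with_feature (feature : String) (out : List String) : Prop := out = get_plans_with_feature_alt feature
instance (feature : String) (out : List String) : Decidable (Spec_get_plans_with_feature feature out) := by unfold Spec_get_plans_with_feature; infer_instance

-- ===== CLAIM (what is proved, stated in full; the proofs are below) =====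
def Claim_equal_get_plans_with_feature : Prop := ∀ (feature : String), Dom_get_plans_with_feature feature → Spec_get_plans_with_feature feature (get_plans_with_feature feature)

-- ===== LEMMAS AND PROOFS =====

lemma pvGetD_free : PySem.Dict.getD pvFeatureAccess "free" [] = [] := by decide

lemma pvGetD_pro : PySem.Dict.getD pvFeatureAccess "pro" [] =
    ["tool_tracking", "personal_analytics", "custom_stacks", "alerts",
     "exports", "api_access", "ai_recommendations"] := by decide

lemma pvGetD_team : PySem.Dict.getD pvFeatureAccess "team" [] =
    ["team_analytics", "team_stacks", "team_sharing", "webhooks", "custom_categories"] := by decide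

lemma pvGetD_ent : PySem.Dict.getD pvFeatureAccess "enterprise" [] =
    ["organization_analytics", "compliance_reporting", "priority_support"] := by decide

-- ===== VERDICT (by name: the statement is the Claim_ definition above) =====
theorem get_plans_with_feature_spec : Claim_equal_get_plans_with_feature := by
  intro feature _
  show get_plans_with_feature feature = get_plans_with_feature_alt feature
  by_cases h : feature ∈ (["tool_tracking", "personal_analytics", "custom_stacks", "alerts",
      "exports", "api_access", "ai_recommendations", "team_analytics", "team_stacks",
      "team_sharing", "webhooks", "custom_categories", "organization_analytics",
      "compliance_reporting", "priority_support"] : List String)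
  · -- the feature is one of the 15 known ones: both sides are closed computations
    simp only [List.mem_cons, List.not_mem_nil, or_false] at h
    rcases h with rfl | rfl | rfl | rfl | rfl | rfl | rfl | rfl | rfl | rfl | rfl | rfl |
      rfl | rfl | rfl <;> decide
  · -- unknown feature: every membership test is false, both sides return []
    simp only [List.mem_cons, List.not_mem_nil, or_false, not_or] at h
    obtain ⟨n1, n2, n3, n4, n5, n6, n7, n8, n9, n10, n11, n12, n13, n14, n15⟩ := h
    simp [get_plans_with_feature, get_plans_with_feature_alt, pvSuffixFrom, pvHierarchy,
      List.foldl, pvGetD_free, pvGetD_pro, pvGetD_team, pvGetD_ent, List.mem_cons,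
      n1, n2, n3, n4, n5, n6, n7, n8, n9, n10, n11, n12, n13, n14, n15]
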